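-- pv_equiv track=rewrite | github.com/lindsay-lew/lindsay-lew.github.io | Project1/markdown_compiler.py | compile_strikethrough
-- ===== SOURCE A (Python) =====
-- def compile_strikethrough(line):
--     '''
--     Convert "~~strikethrough~~" to "<ins>strikethrough</ins>".
--
--     HINT:
--     The strikethrough annotations are very similar to implement as the italic function.
--     The difference is that there are two delimiting characters instead of one.
--     This will require carefully thinking about the range of your for loop and all of your list indexing.
--
--     >>> compile_strikethrough('~~This is strikethrough!~~ This is not strikethrough.')
--     '<ins>This is strikethrough!</ins> This is not strikethrough.'
--     >>> compile_strikethrough('~~This is strikethrough!~~')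
--     '<ins>This is strikethrough!</ins>'
--     >>> compile_strikethrough('This is ~~strikethrough~~!')
--     'This is <ins>strikethrough</ins>!'
--     >>> compile_strikethrough('This is not ~~strikethrough!')
--     'This is not ~~strikethrough!'
--     >>> compile_strikethrough('~~')
--     '~~'
--     '''
--     text = ''
--     i = 0
--     between_tildes = False
--     between_tildes_string = ''
--
--     while i < len(line):
--         # Check for "~~" at current position
--         if line[i:i+2] == '~~':
--             if between_tildes:  # Closing strikethrough tag
--                 text += f"<ins>{between_tildes_string}</ins>"
--                 between_tildes_string = ''
--                 between_tildes = False
--             else:  # Opening strikethrough tag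
--                 between_tildes = True
--             i += 1  # Skip the second '~' in the pair
--
--         elif between_tildes:
--             between_tildes_string += line[i]  # Collect text inside strikethrough
--
--         else:
--             text += line[i]  # Append normal text
--
--         i += 1
--
--     # If strikethrough was never closed, restore unmatched '~~'
--     if between_tildes:
--         text += '~~' + between_tildes_string
--
--     return text
-- ===== SOURCE B (Python) =====
-- def compile_strikethrough(line):
--     # Split on '~~' (leftmost, non-overlapping), then rejoin: every odd part
--     # sits between a matched pair of '~~' and gets wrapped in <ins>..</ins>;
--     # an even number of parts means a trailing unmatched '~~', restored as-is.
--     parts = line.split('~~')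
--     out = [parts[0]]
--     for k in range(1, len(parts) - 1, 2):
--         out.append(f"<ins>{parts[k]}</ins>{parts[k + 1]}")
--     if len(parts) % 2 == 0:
--         out.append('~~' + parts[-1])
--     return ''.join(out)
-- ===== Notes on version B (the rewrite author's own statement) =====
-- stated objective: simpler
-- what changed: Replaces the hand-rolled index/state-machine scan (position counter, between-tildes flag, per-character string buffers, unclosed-restore branch) with a split on the double-tilde delimiter followed by one join: odd-indexed parts are wrapped in <ins>..</ins> and a trailing unmatched delimiter is restored when the part count is even.
import Mathlib
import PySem

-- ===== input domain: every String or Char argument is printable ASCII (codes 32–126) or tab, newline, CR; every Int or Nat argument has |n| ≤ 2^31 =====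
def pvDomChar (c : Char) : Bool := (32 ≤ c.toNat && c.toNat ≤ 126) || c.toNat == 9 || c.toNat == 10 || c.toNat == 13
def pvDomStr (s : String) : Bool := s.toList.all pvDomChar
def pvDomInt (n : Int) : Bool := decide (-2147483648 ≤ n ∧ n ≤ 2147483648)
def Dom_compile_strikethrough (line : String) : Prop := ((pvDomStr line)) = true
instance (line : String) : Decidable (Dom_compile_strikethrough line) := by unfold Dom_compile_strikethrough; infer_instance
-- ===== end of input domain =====

-- B replaces A's index/state-machine scan (quadratic per-character string building) by split-on-delimiter and one rejoin; proved equal on all inputs.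

-- ===== PORT A =====
-- A's while-loop over i with state (text, between_tildes, between_tildes_string);
-- line[i:i+2] == '~~' holds exactly when two chars remain and both are '~'.
def goA : List Char → List Char → Bool → List Char → List Char
  | c1 :: c2 :: rest, text, between, buf =>
      if c1 = '~' ∧ c2 = '~' then
        if between then
          goA rest (text ++ ('<' :: 'i' :: 'n' :: 's' :: '>' :: []) ++ buf ++ ('<' :: '/' :: 'i' :: 'n' :: 's' :: '>' :: [])) false []
        else
          goA rest text true buf
      else
        if between then goA (c2 :: rest) text true (buf ++ [c1])
        else goA (c2 :: rest) (text ++ [c1]) false buf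
  | [c], text, between, buf =>
      if between then goA [] text true (buf ++ [c]) else goA [] (text ++ [c]) false buf
  | [], text, between, buf => if between then text ++ ('~' :: '~' :: buf) else text
  termination_by cs => cs.length

def compile_strikethrough (line : String) : String :=
  String.mk (goA line.toList [] false [])

-- ===== PORT B =====
-- hand port of Python str.split('~~') (leftmost non-overlapping occurrences; exact on all inputs)
def splitTT : List Char → List (List Char)
  | c1 :: c2 :: rest =>
      if c1 = '~' ∧ c2 = '~' then [] :: splitTT rest
      else
        match splitTT (c2 :: rest) with
        | p :: ps => (c1 :: p) :: ps
        | [] => [[c1]]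
  | [c] => [[c]]
  | [] => [[]]
  termination_by cs => cs.length

-- Source B's loop over parts[1::2] pairs plus the final unmatched-'~~' restore
def wrapPairs : List (List Char) → List Char
  | a :: b :: rest =>
      ('<' :: 'i' :: 'n' :: 's' :: '>' :: []) ++ a ++ ('<' :: '/' :: 'i' :: 'n' :: 's' :: '>' :: []) ++ b ++ wrapPairs rest
  | [a] => '~' :: '~' :: a
  | [] => []

def altList (cs : List Char) : List Char :=
  match splitTT cs with
  | p :: ps => p ++ wrapPairs ps
  | [] => []

def compile_strikethrough_alt (line : String) : String :=
  String.mk (altList line.toList)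

-- ===== PRECONDITION & SPEC =====
def Spec_compile_strikethrough (line : String) (out : String) : Prop := out = compile_strikethrough_alt line
instance (line : String) (out : String) : Decidable (Spec_compile_strikethrough line out) := by unfold Spec_compile_strikethrough; infer_instance

-- ===== CLAIM (what is proved, stated in full; the proofs are below) =====
def Claim_equal_compile_strikethrough : Prop := ∀ (line : String), Dom_compile_strikethrough line → Spec_compile_strikethrough line (compile_strikethrough line)

-- ===== LEMMAS AND PROOFS =====

-- first '~~' occurrence: inside = chars before it, after = chars after it
def splitAtPair : List Char → Option (List Char × List Char)
  | c1 :: c2 :: rest =>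
      if c1 = '~' ∧ c2 = '~' then some ([], rest)
      else (splitAtPair (c2 :: rest)).map (fun p => (c1 :: p.1, p.2))
  | _ => none
  termination_by cs => cs.length

lemma splitTT_pair {c1 c2 : Char} {rest : List Char} (hc : c1 = '~' ∧ c2 = '~') :
    splitTT (c1 :: c2 :: rest) = [] :: splitTT rest := by
  rw [splitTT.eq_def]; simp [hc]

lemma splitTT_cons2 {c1 c2 : Char} {rest : List Char} (hc : ¬ (c1 = '~' ∧ c2 = '~')) :
    splitTT (c1 :: c2 :: rest) =
      match splitTT (c2 :: rest) with
      | p :: ps => (c1 :: p) :: ps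
      | [] => [[c1]] := by
  rw [splitTT.eq_def]; simp [hc]

lemma splitTT_ne_nil (cs : List Char) : splitTT cs ≠ [] := by
  induction cs using splitTT.induct with
  | case1 c1 c2 rest h ih => simp [splitTT_pair h]
  | case2 c1 c2 rest h p ps hps ih => simp [splitTT_cons2 h, hps]
  | case3 c1 c2 rest h hps ih => exact absurd hps ih
  | case4 c => simp [splitTT]
  | case5 => simp [splitTT]

lemma split_none {cs : List Char} (h : splitAtPair cs = none) : splitTT cs = [cs] := by
  induction cs using splitTT.induct with
  | case1 c1 c2 rest hc ih => simp [splitAtPair, hc] at h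
  | case2 c1 c2 rest hc p ps hps ih =>
      simp [splitAtPair, hc, Option.map_eq_none_iff] at h
      rw [splitTT_cons2 hc, ih h]
  | case3 c1 c2 rest hc hps ih => exact absurd hps (splitTT_ne_nil _)
  | case4 c => simp [splitTT]
  | case5 => simp [splitTT]

lemma split_some {cs i a : List Char} (h : splitAtPair cs = some (i, a)) :
    splitTT cs = i :: splitTT a := by
  induction cs using splitTT.induct generalizing i a with
  | case1 c1 c2 rest hc ih =>
      simp [splitAtPair, hc] at h
      rw [splitTT_pair hc, h.1, h.2]
  | case2 c1 c2 rest hc p ps hps ih =>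
      simp [splitAtPair, hc] at h
      obtain ⟨i', hsp, hi⟩ := h
      rw [splitTT_cons2 hc, ih hsp]
      simp [hi]
  | case3 c1 c2 rest hc hps ih => exact absurd hps (splitTT_ne_nil _)
  | case4 c => simp [splitAtPair] at h
  | case5 => simp [splitAtPair] at h

lemma main_lemma : ∀ (n : Nat) (cs : List Char), cs.length ≤ n → ∀ (text buf : List Char),
    (goA cs text false [] = text ++ altList cs) ∧
    (goA cs text true buf =
      match splitAtPair cs with
      | none => text ++ ('~' :: '~' :: (buf ++ cs))
      | some (i, a) => text ++ ('<' :: 'i' :: 'n' :: 's' :: '>' :: []) ++ buf ++ i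
          ++ ('<' :: '/' :: 'i' :: 'n' :: 's' :: '>' :: []) ++ altList a) := by
  intro n
  induction n with
  | zero =>
      intro cs h text buf
      have : cs = [] := List.length_eq_zero_iff.mp (Nat.le_zero.mp h)
      subst this
      simp [goA, splitAtPair, altList, splitTT, wrapPairs]
  | succ n ih =>
      intro cs h text buf
      match cs with
      | [] => simp [goA, splitAtPair, altList, splitTT, wrapPairs]
      | [c] =>
          constructor
          · simp [goA, altList, splitTT, wrapPairs]
          · rw [goA]; rw [goA]; simp [splitAtPair.eq_def]
      | c1 :: c2 :: rest =>
          have hr : rest.length ≤ n := by simp at h; omega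
          have hr2 : (c2 :: rest).length ≤ n := by simp at h ⊢; omega
          by_cases hc : c1 = '~' ∧ c2 = '~'
          · constructor
            · -- between = false: open at this '~~'
              rw [goA]
              simp only [hc, if_neg (by simp : ¬ (false = true))]
              rw [(ih rest hr text []).2]
              cases hsp : splitAtPair rest with
              | none =>
                  simp [altList, splitTT_pair (And.intro rfl rfl), split_none hsp, wrapPairs]
              | some p =>
                  obtain ⟨i, a⟩ := p
                  cases hsa : splitTT a with
                  | nil => exact absurd hsa (splitTT_ne_nil a)
                  | cons q qs =>
                      simp [altList, splitTT_pair (And.intro rfl rfl), split_some hsp, hsa, wrapPairs]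
            · -- between = true: close at this '~~'
              rw [goA]
              simp only [hc, if_true]
              rw [(ih rest hr _ []).1]
              simp [splitAtPair]
          · constructor
            · rw [goA]
              simp only [hc, if_false, if_neg (by simp : ¬ (false = true))]
              rw [(ih (c2 :: rest) hr2 (text ++ [c1]) buf).1]
              have halt : altList (c1 :: c2 :: rest) = c1 :: altList (c2 :: rest) := by
                cases hs : splitTT (c2 :: rest) with
                | nil => exact absurd hs (splitTT_ne_nil _)
                | cons p ps => simp [altList, splitTT_cons2 hc, hs]
              simp [halt]
            · rw [goA]
              simp only [hc, if_false]
              rw [(ih (c2 :: rest) hr2 text (buf ++ [c1])).2]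
              cases hsp : splitAtPair (c2 :: rest) with
              | none => simp [splitAtPair, hc, hsp]
              | some p =>
                  obtain ⟨i, a⟩ := p
                  simp [splitAtPair, hc, hsp]

-- ===== VERDICT (by name: the statement is the Claim_ definition above) =====
theorem compile_strikethrough_spec : Claim_equal_compile_strikethrough := by
  intro line _
  unfold Spec_compile_strikethrough compile_strikethrough compile_strikethrough_alt
  rw [(main_lemma line.toList.length line.toList (le_refl _) [] []).1]
  simp
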